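-- pv_equiv track=rewrite | github.com/verickwayne/agent-memory-benchmark | scripts/test_hindsight_extraction.py | truncate_to_steps
-- ===== SOURCE A (Python) =====
-- def truncate_to_steps(content: str, max_steps: int) -> str:
--     """Keep only the first max_steps steps from the trajectory."""
--     lines = content.split("\n")
--     result = []
--     step_count = 0
--     for line in lines:
--         if line.startswith("Step ") and line.endswith(":"):
--             step_count += 1
--             if step_count > max_steps:
--                 break
--         result.append(line)
--     return "\n".join(result)
-- ===== SOURCE B (Python) =====
-- def truncate_to_steps(content: str, max_steps: int) -> str:
--     """Keep only the first max_steps steps from the trajectory."""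
--     lines = content.split("\n")
--     markers = [i for i, line in enumerate(lines)
--                if line.startswith("Step ") and line.endswith(":")]
--     idx = max(max_steps, 0)
--     cut = markers[idx] if idx < len(markers) else len(lines)
--     return "\n".join(lines[:cut])
-- ===== Notes on version B (the rewrite author's own statement) =====
-- stated objective: simpler
-- what changed: Replaces the incremental append-with-counter-and-break loop by computing the list of step-marker line indices once, then returning a single slice/join up to the clamped max_steps-th marker (or the content unchanged).
import Mathlib
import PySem

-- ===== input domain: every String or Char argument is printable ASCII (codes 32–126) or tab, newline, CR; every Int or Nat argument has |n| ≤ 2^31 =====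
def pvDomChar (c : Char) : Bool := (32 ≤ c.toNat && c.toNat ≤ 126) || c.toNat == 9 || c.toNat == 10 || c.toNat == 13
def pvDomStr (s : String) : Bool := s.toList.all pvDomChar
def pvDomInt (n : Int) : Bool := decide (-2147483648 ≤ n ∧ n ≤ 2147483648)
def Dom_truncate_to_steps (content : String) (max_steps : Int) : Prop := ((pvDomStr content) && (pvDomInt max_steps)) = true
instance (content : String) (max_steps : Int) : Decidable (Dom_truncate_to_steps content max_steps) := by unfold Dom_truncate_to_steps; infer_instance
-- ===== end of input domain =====

-- B replaces A's append-with-counter-and-break loop by an index table of step markers plus one slice/join (objective: simpler).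


-- ===== PORT A =====
-- A's for-loop with break: structural recursion over the remaining lines, carrying result and step_count.
def tsA_loop (max_steps : Int) : List String → List String → Int → List String
  | [], result, _ => result
  | line :: rest, result, step_count =>
    if PySem.Str.startswith line "Step " && PySem.Str.endswith line ":" then
      if step_count + 1 > max_steps then result
      else tsA_loop max_steps rest (result ++ [line]) (step_count + 1)
    else tsA_loop max_steps rest (result ++ [line]) step_count

def truncate_to_steps (content : String) (max_steps : Int) : String :=
  let lines := (PySem.Str.split? content "\n").getD []  -- sep "\n" ≠ "", so split? is always `some` here
  PySem.Str.join "\n" (tsA_loop max_steps lines [] 0)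

-- ===== PORT B =====
def truncate_to_steps_alt (content : String) (max_steps : Int) : String :=
  let lines := (PySem.Str.split? content "\n").getD []  -- sep "\n" ≠ "", so split? is always `some` here
  let markers := ((PySem.List.enumerate lines).filter
      (fun p => PySem.Str.startswith p.2 "Step " && PySem.Str.endswith p.2 ":")).map (·.1)
  let idx := max max_steps 0
  let cut := if idx < (markers.length : Int) then PySem.List.pyGetD markers idx 0 else (lines.length : Int)
  PySem.Str.join "\n" (PySem.List.slice lines none (some cut))

-- ===== PRECONDITION & SPEC =====
def Spec_truncate_to_steps (content : String) (max_steps : Int) (out : String) : Prop := out = truncate_to_steps_alt content max_steps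
instance (content : String) (max_steps : Int) (out : String) : Decidable (Spec_truncate_to_steps content max_steps out) := by unfold Spec_truncate_to_steps; infer_instance

-- ===== CLAIM (what is proved, stated in full; the proofs are below) =====
def Claim_equal_truncate_to_steps : Prop := ∀ (content : String) (max_steps : Int), Dom_truncate_to_steps content max_steps → Spec_truncate_to_steps content max_steps (truncate_to_steps content max_steps)

-- ===== LEMMAS AND PROOFS =====

-- the marker predicate both programs test
def pvIsMarker (line : String) : Bool :=
  PySem.Str.startswith line "Step " && PySem.Str.endswith line ":"

-- number of lines kept when k more markers may still be passed
def pvCut : Nat → List String → Nat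
  | _, [] => 0
  | k, l :: rest =>
    if pvIsMarker l then (if k = 0 then 0 else pvCut (k - 1) rest + 1)
    else pvCut k rest + 1

theorem tsA_loop_eq (ms : Int) (ls : List String) : ∀ (acc : List String) (cnt : Int),
    tsA_loop ms ls acc cnt = acc ++ ls.take (pvCut (ms - cnt).toNat ls) := by
  induction ls with
  | nil => intro acc cnt; simp [tsA_loop, pvCut]
  | cons l rest ih =>
    intro acc cnt
    by_cases hm : pvIsMarker l = true
    · have hm' : (PySem.Str.startswith l "Step " && PySem.Str.endswith l ":") = true := hm
      by_cases hb : cnt + 1 > ms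
      · have hk : (ms - cnt).toNat = 0 := by omega
        simp only [tsA_loop, hm', if_true]
        rw [if_pos hb]
        simp [pvCut, hm, hk]
      · have hk : (ms - cnt).toNat ≠ 0 := by omega
        have hk' : (ms - (cnt + 1)).toNat = (ms - cnt).toNat - 1 := by omega
        simp only [tsA_loop, hm', if_true]
        rw [if_neg hb, ih]
        have h1 : pvCut (ms - cnt).toNat (l :: rest) = pvCut ((ms - cnt).toNat - 1) rest + 1 := by
          simp [pvCut, hm, hk]
        rw [h1, hk', List.take_succ_cons]
        simp
    · have hm' : ¬ (PySem.Str.startswith l "Step " && PySem.Str.endswith l ":") = true := hm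
      simp only [tsA_loop]
      rw [if_neg hm', ih]
      simp [pvCut, hm]

theorem markers_cut (ls : List String) : ∀ (k : Nat) (s : Int),
    (if (k : Int) < ((((PySem.List.enumerate ls s).filter (fun p => pvIsMarker p.2)).map (·.1)).length : Int)
      then PySem.List.pyGetD (((PySem.List.enumerate ls s).filter (fun p => pvIsMarker p.2)).map (·.1)) (k : Int) 0
      else s + ls.length) = s + pvCut k ls := by
  induction ls with
  | nil => intro k s; simp [PySem.List.enumerate_nil, pvCut]
  | cons l rest ih =>
    intro k s
    by_cases hm : pvIsMarker l = true
    · have hf : ((PySem.List.enumerate (l :: rest) s).filter (fun p => pvIsMarker p.2)).map (·.1)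
          = s :: ((PySem.List.enumerate rest (s + 1)).filter (fun p => pvIsMarker p.2)).map (·.1) := by
        rw [PySem.List.enumerate_cons, List.filter_cons]
        simp [hm]
      rw [hf]
      match k with
      | 0 =>
        rw [if_pos (by rw [List.length_cons]; omega)]
        simp [pvCut, hm]
      | k + 1 =>
        have hIH := ih k (s + 1)
        by_cases hlt : (k : Int) < ((((PySem.List.enumerate rest (s + 1)).filter (fun p => pvIsMarker p.2)).map (·.1)).length : Int)
        · rw [if_pos (by rw [List.length_cons]; push_cast at hlt ⊢; omega)]
          have hg : PySem.List.pyGetD (s :: ((PySem.List.enumerate rest (s + 1)).filter (fun p => pvIsMarker p.2)).map (·.1)) ((k + 1 : Nat) : Int) 0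
              = PySem.List.pyGetD (((PySem.List.enumerate rest (s + 1)).filter (fun p => pvIsMarker p.2)).map (·.1)) ((k : Nat) : Int) 0 := by
            rw [PySem.List.pyGetD_natCast, PySem.List.pyGetD_natCast, List.getD_cons_succ]
          rw [hg]
          rw [if_pos hlt] at hIH
          rw [hIH]
          have h1 : pvCut (k + 1) (l :: rest) = pvCut k rest + 1 := by simp [pvCut, hm]
          rw [h1]
          omega
        · rw [if_neg (by rw [List.length_cons]; push_cast at hlt ⊢; omega)]
          rw [if_neg hlt] at hIH
          have h1 : pvCut (k + 1) (l :: rest) = pvCut k rest + 1 := by simp [pvCut, hm]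
          rw [List.length_cons, h1]
          omega
    · have hf : ((PySem.List.enumerate (l :: rest) s).filter (fun p => pvIsMarker p.2)).map (·.1)
          = ((PySem.List.enumerate rest (s + 1)).filter (fun p => pvIsMarker p.2)).map (·.1) := by
        rw [PySem.List.enumerate_cons, List.filter_cons]
        simp [hm]
      rw [hf]
      have hIH := ih k (s + 1)
      have h1 : pvCut k (l :: rest) = pvCut k rest + 1 := by simp [pvCut, hm]
      by_cases hlt : (k : Int) < ((((PySem.List.enumerate rest (s + 1)).filter (fun p => pvIsMarker p.2)).map (·.1)).length : Int)
      · rw [if_pos hlt]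
        rw [if_pos hlt] at hIH
        rw [hIH, h1]
        omega
      · rw [if_neg hlt]
        rw [if_neg hlt] at hIH
        rw [List.length_cons, h1]
        omega

theorem key (ls : List String) (ms : Int) :
    tsA_loop ms ls [] 0
      = PySem.List.slice ls none (some
          (if max ms 0 < ((((PySem.List.enumerate ls 0).filter
                (fun p => PySem.Str.startswith p.2 "Step " && PySem.Str.endswith p.2 ":")).map (·.1)).length : Int)
            then PySem.List.pyGetD (((PySem.List.enumerate ls 0).filter
                (fun p => PySem.Str.startswith p.2 "Step " && PySem.Str.endswith p.2 ":")).map (·.1)) (max ms 0) 0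
            else (ls.length : Int))) := by
  have hidx : max ms 0 = ((ms.toNat : Nat) : Int) := by omega
  have hB := markers_cut ls ms.toNat 0
  simp only [pvIsMarker, zero_add] at hB
  rw [hidx, hB]
  rw [PySem.List.slice_to ls (by exact_mod_cast Nat.zero_le _)]
  rw [tsA_loop_eq]
  simp

-- ===== VERDICT (by name: the statement is the Claim_ definition above) =====
theorem truncate_to_steps_spec : Claim_equal_truncate_to_steps := by
  intro content max_steps _
  unfold Spec_truncate_to_steps truncate_to_steps truncate_to_steps_alt
  exact congrArg (PySem.Str.join "\n") (key ((PySem.Str.split? content "\n").getD []) max_steps)
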